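-- pv_equiv track=rewrite | github.com/sine-io/cosbench-go | scripts/smoke_ready.py | pick_latest_result
-- ===== SOURCE A (Python) =====
-- def pick_latest_result(workflow_latest, names):
--     latest_name = None
--     latest_created_at = ""
--     for name in names:
--         row = workflow_latest.get(name) or {}
--         created_at = row.get("created_at", "")
--         if created_at >= latest_created_at:
--             latest_name = name
--             latest_created_at = created_at
--     return latest_name
-- ===== SOURCE B (Python) =====
-- def pick_latest_result(workflow_latest, names):
--     if not names:
--         return None
--     return sorted(names, key=lambda n: (workflow_latest.get(n) or {}).get("created_at", ""))[-1]
-- ===== Notes on version B (the rewrite author's own statement) =====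
-- stated objective: idiomatic
-- what changed: Replaced the explicit last-wins max-tracking loop with a stable ascending sort of names by their created_at key and taking the last element (ties resolved by sort stability), guarding the empty list with None.
import Mathlib
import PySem

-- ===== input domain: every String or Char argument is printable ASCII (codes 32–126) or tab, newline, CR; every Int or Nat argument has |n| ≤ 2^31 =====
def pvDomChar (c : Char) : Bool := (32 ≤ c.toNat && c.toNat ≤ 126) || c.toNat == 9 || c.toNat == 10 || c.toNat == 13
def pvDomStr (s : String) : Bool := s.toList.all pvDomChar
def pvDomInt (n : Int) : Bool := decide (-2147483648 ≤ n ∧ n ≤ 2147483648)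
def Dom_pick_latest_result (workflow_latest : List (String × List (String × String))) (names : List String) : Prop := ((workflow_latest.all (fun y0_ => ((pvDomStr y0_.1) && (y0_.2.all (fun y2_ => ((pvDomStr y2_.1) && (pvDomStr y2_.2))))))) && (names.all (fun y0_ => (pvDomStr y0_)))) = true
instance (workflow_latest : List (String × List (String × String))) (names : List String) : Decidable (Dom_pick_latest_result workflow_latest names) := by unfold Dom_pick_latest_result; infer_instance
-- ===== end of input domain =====

-- B replaces A's explicit max-tracking loop with a stable sort by created_at and taking the last element (idiomatic; not faster).


-- ===== PORT A =====
def pick_latest_result (workflow_latest : List (String × List (String × String))) (names : List String) : Option String :=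
  -- for name in names: update (latest_name, latest_created_at) when created_at >= latest_created_at
  (names.foldl (fun (st : Option String × String) name =>
      let row := ((PySem.Dict.mk workflow_latest).get? name).getD []   -- workflow_latest.get(name) or {}
      let created_at := ((PySem.Dict.mk row).get? "created_at").getD ""  -- row.get("created_at", "")
      if st.2 ≤ created_at then (some name, created_at) else st)
    (none, "")).1

-- ===== PORT B =====
-- the sort key: (workflow_latest.get(n) or {}).get("created_at", "")
def pvKey_pick_latest_result (workflow_latest : List (String × List (String × String))) (n : String) : String :=
  ((PySem.Dict.mk (((PySem.Dict.mk workflow_latest).get? n).getD [])).get? "created_at").getD ""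

def pick_latest_result_alt (workflow_latest : List (String × List (String × String))) (names : List String) : Option String :=
  match names with
  | [] => none   -- if not names: return None
  | _ :: _ =>    -- sorted(names, key=...)[-1]  (stable ascending sort, last element)
    PySem.List.pyGet? (PySem.List.sorted names (pvKey_pick_latest_result workflow_latest)) (-1)

-- ===== PRECONDITION & SPEC =====
def Spec_pick_latest_result (workflow_latest : List (String × List (String × String))) (names : List String) (out : Option String) : Prop := out = pick_latest_result_alt workflow_latest names
instance (workflow_latest : List (String × List (String × String))) (names : List String) (out : Option String) : Decidable (Spec_pick_latest_result workflow_latest names out) := by unfold Spec_pick_latest_result; infer_instance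

-- ===== CLAIM (what is proved, stated in full; the proofs are below) =====
def Claim_equal_pick_latest_result : Prop := ∀ (workflow_latest : List (String × List (String × String))) (names : List String), Dom_pick_latest_result workflow_latest names → Spec_pick_latest_result workflow_latest names (pick_latest_result workflow_latest names)

-- ===== LEMMAS AND PROOFS =====

lemma getLast?_cons_ne {α : Type} (y : α) (t : List α) (h : t ≠ []) :
    (y :: t).getLast? = t.getLast? := by
  cases t with
  | nil => simp at h
  | cons z t' => exact List.getLast?_cons_cons ..

lemma empty_string_le (s : String) : "" ≤ s := by
  by_contra h
  have h2 : s < "" := lt_of_not_ge h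
  rw [String.lt_iff_toList_lt] at h2
  exact List.not_lt_nil _ h2

lemma insertBy_ne_nil {α : Type} (before : α → α → Bool) (x : α) (ys : List α) :
    PySem.List.insertBy before x ys ≠ [] := by
  cases ys with
  | nil => simp [PySem.List.insertBy]
  | cons y t =>
    simp only [PySem.List.insertBy]
    split <;> simp

lemma getLast?_insertBy {α : Type} (before : α → α → Bool) (x : α) :
    ∀ (ys : List α) (l : α), ys.getLast? = some l → before x l = true →
      (PySem.List.insertBy before x ys).getLast? = some l := by
  intro ys
  induction ys with
  | nil => intro l hl _; simp at hl
  | cons y t ih =>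
    intro l hl hb
    simp only [PySem.List.insertBy]
    by_cases hby : before x y = true
    · simp only [hby, if_true]
      rw [List.getLast?_cons_cons]
      exact hl
    · rw [if_neg hby]
      cases t with
      | nil =>
        simp at hl
        subst hl
        exact absurd hb hby
      | cons z t' =>
        rw [List.getLast?_cons_cons] at hl
        rw [getLast?_cons_ne y _ (insertBy_ne_nil before x (z :: t'))]
        exact ih l hl hb

lemma loop_eq (key : String → String) :
    ∀ (names acc : List String) (m : Option String) (k : String),
      (∀ y ∈ acc, key y ≤ k) →
      ((acc = [] ∧ m = none ∧ k = "") ∨ (∃ l, acc.getLast? = some l ∧ m = some l ∧ k = key l)) →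
      (names.foldl (fun (st : Option String × String) n =>
          if st.2 ≤ key n then (some n, key n) else st) (m, k)).1
        = (names.foldl (fun a x =>
            PySem.List.insertBy (fun a b => decide (key a < key b)) x a) acc).getLast? := by
  intro names
  induction names with
  | nil =>
    intro acc m k _ hinv
    rcases hinv with ⟨hacc, hm, _⟩ | ⟨l, hl, hm, _⟩
    · subst hacc; subst hm; rfl
    · subst hm; simp [hl]
  | cons x rest ih =>
    intro acc m k hub hinv
    simp only [List.foldl_cons]
    by_cases hle : k ≤ key x
    · -- x wins: insertBy appends x at the end
      have hins : PySem.List.insertBy (fun a b => decide (key a < key b)) x acc = acc ++ [x] := by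
        apply PySem.List.insertBy_of_forall_not_before
        intro y hy
        simp only [decide_eq_false_iff_not, not_lt]
        exact le_trans (hub y hy) hle
      rw [if_pos hle, hins]
      apply ih (acc ++ [x]) (some x) (key x)
      · intro y hy
        rcases List.mem_append.mp hy with h | h
        · exact le_trans (hub y h) hle
        · simp at h; subst h; exact le_refl _
      · right; exact ⟨x, by simp, rfl, rfl⟩
    · -- x loses: key x < k; acc is nonempty with last l, k = key l
      have hxk : key x < k := lt_of_not_ge hle
      rcases hinv with ⟨_, _, hk⟩ | ⟨l, hl, hm, hk⟩
      · subst hk; exact absurd (empty_string_le (key x)) hle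
      · subst hk
        rw [if_neg hle]
        have hins := getLast?_insertBy (fun a b => decide (key a < key b)) x acc l hl
          (by simp only [decide_eq_true_eq]; exact hxk)
        apply ih _ m (key l)
        · intro y hy
          rcases (PySem.List.mem_insertBy _ _ _ _).mp hy with h | h
          · subst h; exact le_of_lt hxk
          · exact hub y h
        · right; exact ⟨l, hins, hm, rfl⟩

-- ===== VERDICT (by name: the statement is the Claim_ definition above) =====
theorem pick_latest_result_spec : Claim_equal_pick_latest_result := by
  intro wl names _
  unfold Spec_pick_latest_result pick_latest_result pick_latest_result_alt
  cases names with
  | nil => simp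
  | cons h t =>
    rw [PySem.List.pyGet?_neg_one, PySem.List.sorted_eq_foldl_insertBy]
    exact loop_eq (pvKey_pick_latest_result wl) (h :: t) [] none "" (by simp) (Or.inl ⟨rfl, rfl, rfl⟩)
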